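-- pv_equiv track=rewrite | github.com/ArturMosk/Python_Basic-Skillbox- | Module19/07_pizza/main.py | search_and_output_orders_by_name
-- ===== SOURCE A (Python) =====
-- def search_and_output_orders_by_name(orders, names):
--     orders_by_name = dict()
--     for name in names:
--         orders_for_name = dict()
--         for element in orders:
--             for buyer, order in element.items():
--                 if buyer == name:
--                     if order[0] in orders_for_name:
--                         orders_for_name[order[0]] += order[1]
--                     else:
--                         orders_for_name[order[0]] = order[1]
--         orders_by_name[name] = orders_for_name
--
--     return orders_by_name
-- ===== SOURCE B (Python) =====
-- def search_and_output_orders_by_name(orders, names):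
--     grouped = dict()
--     for element in orders:
--         for buyer, order in element.items():
--             by_pizza = grouped.setdefault(buyer, dict())
--             by_pizza[order[0]] = by_pizza.get(order[0], 0) + order[1]
--     return {name: dict(grouped.get(name, dict())) for name in names}
-- ===== Notes on version B (the rewrite author's own statement) =====
-- stated objective: faster
-- what changed: Instead of rescanning every order for each name, B groups all orders by buyer in one pass into a dict of dicts and then answers each name by a single lookup.
import Mathlib
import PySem

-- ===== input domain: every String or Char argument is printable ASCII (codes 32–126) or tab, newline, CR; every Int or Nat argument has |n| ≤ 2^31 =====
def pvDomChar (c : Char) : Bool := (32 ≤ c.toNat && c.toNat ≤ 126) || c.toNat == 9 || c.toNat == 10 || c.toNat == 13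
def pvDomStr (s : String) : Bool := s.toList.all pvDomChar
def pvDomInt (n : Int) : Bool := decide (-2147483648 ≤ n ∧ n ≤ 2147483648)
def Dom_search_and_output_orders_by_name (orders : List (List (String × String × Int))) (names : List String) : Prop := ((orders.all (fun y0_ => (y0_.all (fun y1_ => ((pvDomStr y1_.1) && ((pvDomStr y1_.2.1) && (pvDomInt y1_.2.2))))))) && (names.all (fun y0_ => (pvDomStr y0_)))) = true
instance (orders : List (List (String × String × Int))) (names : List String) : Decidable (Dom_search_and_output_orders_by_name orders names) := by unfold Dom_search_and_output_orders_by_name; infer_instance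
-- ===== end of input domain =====

-- B replaces A's per-name rescan of all orders by one grouping pass over the orders
-- (dict buyer -> dict pizza -> qty) followed by a single lookup per name (faster: asymptotic).


-- ===== PORT A =====
-- for name in names: scan all orders, summing quantities per pizza when buyer == name
def search_and_output_orders_by_name (orders : List (List (String × String × Int))) (names : List String) : List (String × List (String × Int)) :=
  let orders_by_name :=
    names.foldl (fun orders_by_name name =>
      let orders_for_name :=
        orders.foldl (fun orders_for_name element =>
          element.foldl (fun orders_for_name p =>
            let buyer := p.1
            let order := p.2
            if buyer == name then
              if orders_for_name.contains order.1 then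
                orders_for_name.insert order.1 (orders_for_name.getD order.1 0 + order.2)
              else
                orders_for_name.insert order.1 order.2
            else orders_for_name) orders_for_name)
          (PySem.Dict.empty : PySem.Dict String Int)
      orders_by_name.insert name orders_for_name)
      (PySem.Dict.empty : PySem.Dict String (PySem.Dict String Int))
  orders_by_name.items.map (fun p => (p.1, p.2.items))

-- ===== PORT B =====
-- one grouping pass: grouped[buyer][pizza] += qty; then one lookup per name
def search_and_output_orders_by_name_alt (orders : List (List (String × String × Int))) (names : List String) : List (String × List (String × Int)) :=
  let grouped :=
    orders.foldl (fun grouped element =>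
      element.foldl (fun grouped p =>
        -- by_pizza = grouped.setdefault(buyer, {}); by_pizza[pizza] = by_pizza.get(pizza, 0) + qty
        grouped.modify p.1 PySem.Dict.empty
          (fun by_pizza => by_pizza.insert p.2.1 (by_pizza.getD p.2.1 0 + p.2.2))) grouped)
      (PySem.Dict.empty : PySem.Dict String (PySem.Dict String Int))
  (names.foldl (fun res name => res.insert name (grouped.getD name PySem.Dict.empty))
      (PySem.Dict.empty : PySem.Dict String (PySem.Dict String Int))).items.map
    (fun p => (p.1, p.2.items))

-- ===== PRECONDITION & SPEC =====
def Spec_search_and_output_orders_by_name (orders : List (List (String × String × Int))) (names : List String) (out : List (String × List (String × Int))) : Prop := out = search_and_output_orders_by_name_alt orders names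
instance (orders : List (List (String × String × Int))) (names : List String) (out : List (String × List (String × Int))) : Decidable (Spec_search_and_output_orders_by_name orders names out) := by unfold Spec_search_and_output_orders_by_name; infer_instance

-- ===== CLAIM (what is proved, stated in full; the proofs are below) =====
def Claim_equal_search_and_output_orders_by_name : Prop := ∀ (orders : List (List (String × String × Int))) (names : List String), Dom_search_and_output_orders_by_name orders names → Spec_search_and_output_orders_by_name orders names (search_and_output_orders_by_name orders names)


-- ===== LEMMAS AND PROOFS =====

-- A's conditional update equals B's unconditional update of the per-pizza dict.
theorem pv_step_eq (d : PySem.Dict String Int) (p : String) (q : Int) :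
    (if d.contains p then d.insert p (d.getD p 0 + q) else d.insert p q)
      = d.insert p (d.getD p 0 + q) := by
  by_cases h : d.contains p = true
  · simp [h]
  · simp only [Bool.not_eq_true] at h
    rw [if_neg (by simp [h]), PySem.Dict.getD_of_not_contains d 0 h, zero_add]

-- A's filtered fold with the contains-branch equals the same fold with the merged step.
theorem pv_cond (name : String) (l : List (String × String × Int)) :
    ∀ d : PySem.Dict String Int,
    l.foldl (fun d p =>
        if p.1 == name then
          if d.contains p.2.1 then d.insert p.2.1 (d.getD p.2.1 0 + p.2.2)
          else d.insert p.2.1 p.2.2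
        else d) d
      = l.foldl (fun d p =>
          if p.1 == name then d.insert p.2.1 (d.getD p.2.1 0 + p.2.2) else d) d := by
  induction l with
  | nil => intro d; rfl
  | cons x xs ih =>
    intro d
    simp only [List.foldl_cons]
    by_cases hx : (x.1 == name) = true
    · rw [if_pos hx, if_pos hx, pv_step_eq, ih]
    · rw [if_neg hx, if_neg hx, ih]

-- Over one flat list: looking up `name` after B's grouping fold equals A's filtered fold.
theorem pv_flat (name : String) (l : List (String × String × Int))
    (g : PySem.Dict String (PySem.Dict String Int)) (d : PySem.Dict String Int)
    (h : g.getD name PySem.Dict.empty = d) :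
    (l.foldl (fun g p =>
        g.modify p.1 PySem.Dict.empty
          (fun b => b.insert p.2.1 (b.getD p.2.1 0 + p.2.2))) g).getD name PySem.Dict.empty
      = l.foldl (fun d p =>
          if p.1 == name then d.insert p.2.1 (d.getD p.2.1 0 + p.2.2) else d) d := by
  induction l generalizing g d with
  | nil => simpa using h
  | cons x xs ih =>
    simp only [List.foldl_cons]
    by_cases hx : x.1 = name
    · subst hx
      rw [if_pos (by simp)]
      exact ih _ _ (by rw [PySem.Dict.getD_modify_self, h])
    · rw [if_neg (by simpa using fun he => hx he)]
      exact ih _ _ (by rw [PySem.Dict.getD_modify_of_ne _ _ _ (fun he => hx he.symm), h])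

-- A's per-name accumulation over all orders = one lookup in B's grouped dict.
theorem pv_key (orders : List (List (String × String × Int))) (name : String) :
    orders.foldl (fun orders_for_name element =>
        element.foldl (fun orders_for_name p =>
          if p.1 == name then
            if orders_for_name.contains p.2.1 then
              orders_for_name.insert p.2.1 (orders_for_name.getD p.2.1 0 + p.2.2)
            else
              orders_for_name.insert p.2.1 p.2.2
          else orders_for_name) orders_for_name)
      (PySem.Dict.empty : PySem.Dict String Int)
      = (orders.foldl (fun grouped element =>
          element.foldl (fun grouped p =>
            grouped.modify p.1 PySem.Dict.empty
              (fun b => b.insert p.2.1 (b.getD p.2.1 0 + p.2.2))) grouped)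
          (PySem.Dict.empty : PySem.Dict String (PySem.Dict String Int))).getD name
          PySem.Dict.empty := by
  rw [← List.foldl_flatten, ← List.foldl_flatten, pv_cond,
    pv_flat name orders.flatten PySem.Dict.empty PySem.Dict.empty (PySem.Dict.getD_empty _ _)]

-- ===== VERDICT (by name: the statement is the Claim_ definition above) =====
theorem search_and_output_orders_by_name_spec : Claim_equal_search_and_output_orders_by_name := by
  intro orders names _
  unfold Spec_search_and_output_orders_by_name
  unfold search_and_output_orders_by_name search_and_output_orders_by_name_alt
  have hfun :
      (fun (obn : PySem.Dict String (PySem.Dict String Int)) name =>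
        obn.insert name
          (orders.foldl (fun orders_for_name element =>
            element.foldl (fun orders_for_name p =>
              if p.1 == name then
                if orders_for_name.contains p.2.1 then
                  orders_for_name.insert p.2.1 (orders_for_name.getD p.2.1 0 + p.2.2)
                else
                  orders_for_name.insert p.2.1 p.2.2
              else orders_for_name) orders_for_name)
            (PySem.Dict.empty : PySem.Dict String Int)))
      = (fun (obn : PySem.Dict String (PySem.Dict String Int)) name =>
          obn.insert name
            ((orders.foldl (fun grouped element =>
              element.foldl (fun grouped p =>
                grouped.modify p.1 PySem.Dict.empty
                  (fun b => b.insert p.2.1 (b.getD p.2.1 0 + p.2.2))) grouped)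
              (PySem.Dict.empty : PySem.Dict String (PySem.Dict String Int))).getD name
              PySem.Dict.empty)) := by
    funext obn name
    rw [pv_key orders name]
  simp only [hfun]
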